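-- pv_equiv track=rewrite | github.com/armanvanr/Hackerrank | Algorithms/E17_Migratory_Birds.py | mig_bird
-- ===== SOURCE A (Python) =====
-- def mig_bird(arr):
--     bird_type = [1,2,3,4,5]
--     count_list = []
--     for type in bird_type:
--         count_list.append(arr.count(type))
--     max_f = max(count_list)
--     result = count_list.index(max_f) +1
--     return result
-- ===== SOURCE B (Python) =====
-- def mig_bird(arr):
--     # sort the in-range sightings, then scan runs: first longest run = lowest type with max count
--     vals = sorted(v for v in arr if 1 <= v <= 5)
--     best, best_len = 1, 0
--     i, n = 0, len(vals)
--     while i < n: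
--         j = i
--         while j < n and vals[j] == vals[i]:
--             j += 1
--         if j - i > best_len:
--             best, best_len = vals[i], j - i
--         i = j
--     return best
-- ===== Notes on version B (the rewrite author's own statement) =====
-- stated objective: alternative
-- what changed: Replaces A's five separate arr.count scans plus max/index passes with a sort of the in-range sightings followed by a single run-length scan of the sorted list, tracking the first longest run (which is the lowest type on ties).
import Mathlib
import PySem

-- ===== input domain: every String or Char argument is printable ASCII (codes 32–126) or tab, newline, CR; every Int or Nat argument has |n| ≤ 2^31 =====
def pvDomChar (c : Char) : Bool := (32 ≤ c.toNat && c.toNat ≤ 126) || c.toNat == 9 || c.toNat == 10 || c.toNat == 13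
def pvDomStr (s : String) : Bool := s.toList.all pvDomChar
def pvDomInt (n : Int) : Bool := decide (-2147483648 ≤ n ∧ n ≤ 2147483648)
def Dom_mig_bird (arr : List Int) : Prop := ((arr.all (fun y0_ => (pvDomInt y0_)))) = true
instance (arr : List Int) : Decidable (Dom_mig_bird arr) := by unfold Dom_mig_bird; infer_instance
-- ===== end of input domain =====

-- B replaces A's five arr.count scans + max/index with sort-the-in-range-values then a run-length scan (alternative algorithm).


-- ===== PORT A =====
def mig_bird (arr : List Int) : Int :=
  let bird_type : List Int := [1,2,3,4,5]
  let count_list : List Int :=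
    bird_type.foldl (fun cl t => cl ++ [(PySem.List.count arr t : Int)]) []
  -- count_list always has 5 elements, so max/index never hit their 'empty' default
  let max_f : Int := (PySem.List.max? count_list (fun x => x)).getD 0
  let result : Int := ((PySem.List.index? count_list max_f).getD 0 : Int) + 1
  result

-- ===== PORT B =====
-- B's run scan: the outer while loop becomes this recursion; the inner
-- 'while vals[j] == vals[i]' advance is the takeWhile/dropWhile split of the run.
def runScan : List Int → Int → Int → Int
  | [], best, _ => best
  | v :: rest, best, bestLen =>
      let run := rest.takeWhile (· == v)
      let rest' := rest.dropWhile (· == v)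
      let len : Int := (run.length : Int) + 1
      if len > bestLen then runScan rest' v len else runScan rest' best bestLen
  termination_by xs _ _ => xs.length
  decreasing_by
    all_goals exact Nat.lt_succ_of_le (List.length_dropWhile_le _ _)

def mig_bird_alt (arr : List Int) : Int :=
  let vals := PySem.List.sorted (arr.filter (fun v => decide (1 ≤ v) && decide (v ≤ 5))) (fun x => x) false
  runScan vals 1 0

-- ===== PRECONDITION & SPEC =====
def Spec_mig_bird (arr : List Int) (out : Int) : Prop := out = mig_bird_alt arr
instance (arr : List Int) (out : Int) : Decidable (Spec_mig_bird arr out) := by unfold Spec_mig_bird; infer_instance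

-- ===== CLAIM (what is proved, stated in full; the proofs are below) =====
def Claim_equal_mig_bird : Prop := ∀ (arr : List Int), Dom_mig_bird arr → Spec_mig_bird arr (mig_bird arr)

-- ===== LEMMAS AND PROOFS =====

-- the sorted filtered list is the concatenation of one replicate block per bird type
def reps (arr : List Int) : List Int :=
  List.replicate (arr.count 1) 1 ++ (List.replicate (arr.count 2) 2 ++
    (List.replicate (arr.count 3) 3 ++ (List.replicate (arr.count 4) 4 ++
      List.replicate (arr.count 5) 5)))

lemma count_filter' (p : Int → Bool) (x : Int) (l : List Int) :
    (l.filter p).count x = if p x then l.count x else 0 := by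
  split_ifs with h
  · exact List.count_filter h
  · rw [List.count_eq_zero]
    intro hx
    exact absurd (List.of_mem_filter hx) (by simp [h])

lemma reps_perm (arr : List Int) :
    (reps arr).Perm (arr.filter (fun v => decide (1 ≤ v) && decide (v ≤ 5))) := by
  rw [List.perm_iff_count]
  intro x
  rw [count_filter']
  unfold reps
  simp only [List.count_append, List.count_replicate, beq_iff_eq]
  by_cases h1 : x = 1
  · subst h1; simp
  · by_cases h2 : x = 2
    · subst h2; simp
    · by_cases h3 : x = 3
      · subst h3; simp
      · by_cases h4 : x = 4
        · subst h4; simp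
        · by_cases h5 : x = 5
          · subst h5; simp
          · have hout : ¬(1 ≤ x ∧ x ≤ 5) := by
              intro ⟨hl, hr⟩; interval_cases x <;> simp_all
            have hc : (decide (1 ≤ x) && decide (x ≤ 5)) = false := by
              rw [← Bool.decide_and]; exact decide_eq_false hout
            rw [hc, if_neg (fun h => Bool.false_ne_true h)]
            split_ifs <;> omega

lemma rep_le_block (c : Nat) (v : Int) (rest : List Int) (hv : ∀ x ∈ rest, v ≤ x)
    (hrest : rest.Pairwise (· ≤ ·)) : (List.replicate c v ++ rest).Pairwise (· ≤ ·) := by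
  rw [List.pairwise_append]
  refine ⟨List.pairwise_replicate.2 (Or.inr le_rfl), hrest, ?_⟩
  intro a ha b hb
  rw [List.mem_replicate] at ha
  rw [ha.2]
  exact hv b hb

lemma reps_pairwise (arr : List Int) : (reps arr).Pairwise (· ≤ ·) := by
  unfold reps
  refine rep_le_block _ _ _ ?_ (rep_le_block _ _ _ ?_ (rep_le_block _ _ _ ?_
    (rep_le_block _ _ _ ?_ (List.pairwise_replicate.2 (Or.inr le_rfl))))) <;>
    (intro x hx; simp only [List.mem_append, List.mem_replicate] at hx; omega)

lemma sorted_filter_eq_reps (arr : List Int) :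
    PySem.List.sorted (arr.filter (fun v => decide (1 ≤ v) && decide (v ≤ 5))) (fun x => x) false
      = reps arr :=
  PySem.List.sorted_id_eq_of_perm_of_pairwise _ _ (reps_perm arr) (reps_pairwise arr)

-- evaluating the run scan over one replicate block
lemma takeWhile_rep (v : Int) (k : Nat) (rest : List Int) (h : ∀ x ∈ rest, x ≠ v) :
    (List.replicate k v ++ rest).takeWhile (· == v) = List.replicate k v := by
  induction k with
  | zero =>
    cases rest with
    | nil => rfl
    | cons y ys =>
      simp [h y (by simp)]
  | succ n ih => simpa [List.replicate_succ, List.takeWhile_cons] using ih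

lemma dropWhile_rep (v : Int) (k : Nat) (rest : List Int) (h : ∀ x ∈ rest, x ≠ v) :
    (List.replicate k v ++ rest).dropWhile (· == v) = rest := by
  induction k with
  | zero =>
    cases rest with
    | nil => rfl
    | cons y ys =>
      simp [h y (by simp)]
  | succ n ih => simpa [List.replicate_succ, List.dropWhile_cons] using ih

lemma runScan_rep (v : Int) (c : Nat) (rest : List Int) (best bestLen : Int)
    (h : ∀ x ∈ rest, x ≠ v) (hb : 0 ≤ bestLen) :
    runScan (List.replicate c v ++ rest) best bestLen =
      if (c : Int) > bestLen then runScan rest v c else runScan rest best bestLen := by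
  cases c with
  | zero =>
    simp only [List.replicate_zero, List.nil_append]
    rw [if_neg (by omega)]
  | succ k =>
    rw [List.replicate_succ, List.cons_append, runScan]
    simp only [takeWhile_rep v k rest h, dropWhile_rep v k rest h, List.length_replicate]
    have : ((k : Int) + 1) = ((k + 1 : Nat) : Int) := by push_cast; ring
    rw [this]

-- A's max+first-index selection over the five counts, as the ordered strict-> scan
lemma selection (g : Int → Int) :
    ((PySem.List.index? [g 1, g 2, g 3, g 4, g 5]
        ((PySem.List.max? [g 1, g 2, g 3, g 4, g 5] (fun x => x)).getD 0)).getD 0 : Int) + 1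
    = ([2,3,4,5] : List Int).foldl
        (fun best t => if g t > g best then t else best) 1 := by
  rw [PySem.List.max?_id_cons]
  simp only [List.foldl_cons, List.foldl_nil, Option.getD_some]
  set m := max (max (max (max (g 1) (g 2)) (g 3)) (g 4)) (g 5) with hm
  by_cases h1 : g 1 = m
  · rw [h1, PySem.List.index?_cons_self]
    simp only [Option.getD_some]
    split_ifs <;> omega
  · by_cases h2 : g 2 = m
    · rw [PySem.List.index?_cons_of_ne _ h1, h2, PySem.List.index?_cons_self]
      simp only [Option.map_some, Option.getD_some]
      split_ifs <;> omega
    · by_cases h3 : g 3 = m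
      · rw [PySem.List.index?_cons_of_ne _ h1, PySem.List.index?_cons_of_ne _ h2,
          h3, PySem.List.index?_cons_self]
        simp only [Option.map_some, Option.getD_some]
        split_ifs <;> omega
      · by_cases h4 : g 4 = m
        · rw [PySem.List.index?_cons_of_ne _ h1, PySem.List.index?_cons_of_ne _ h2,
            PySem.List.index?_cons_of_ne _ h3, h4, PySem.List.index?_cons_self]
          simp only [Option.map_some, Option.getD_some]
          split_ifs <;> omega
        · have h5 : g 5 = m := by omega
          rw [PySem.List.index?_cons_of_ne _ h1, PySem.List.index?_cons_of_ne _ h2,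
            PySem.List.index?_cons_of_ne _ h3, PySem.List.index?_cons_of_ne _ h4,
            h5, PySem.List.index?_cons_self]
          simp only [Option.map_some, Option.getD_some]
          split_ifs <;> omega

-- the run scan over replicate blocks with pairwise-distinct values, as a scan over (value,count) pairs
def scanB : List (Int × Nat) → Int → Int → Int
  | [], best, _ => best
  | (v, c) :: t, best, bestLen =>
      if (c : Int) > bestLen then scanB t v c else scanB t best bestLen

def flat (bs : List (Int × Nat)) : List Int :=
  (bs.map (fun p => List.replicate p.2 p.1)).flatten

lemma runScan_flat (bs : List (Int × Nat)) (best bestLen : Int) (hb : 0 ≤ bestLen)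
    (hd : bs.Pairwise (fun p q => p.1 ≠ q.1)) :
    runScan (flat bs) best bestLen = scanB bs best bestLen := by
  induction bs generalizing best bestLen with
  | nil => simp [flat, runScan, scanB]
  | cons p t ih =>
    obtain ⟨v, c⟩ := p
    rw [List.pairwise_cons] at hd
    have hmem : ∀ x ∈ flat t, x ≠ v := by
      intro x hx
      unfold flat at hx
      simp only [List.mem_flatten, List.mem_map] at hx
      obtain ⟨l, ⟨q, hq, rfl⟩, hxl⟩ := hx
      rw [List.mem_replicate] at hxl
      rw [hxl.2]
      exact fun h => (hd.1 q hq) h.symm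
    have hflat : flat ((v, c) :: t) = List.replicate c v ++ flat t := by
      unfold flat; simp
    rw [hflat, runScan_rep v c (flat t) best bestLen hmem hb, scanB]
    split_ifs with h
    · exact ih v (c : Int) (by positivity) hd.2
    · exact ih best bestLen hb hd.2

set_option maxHeartbeats 1000000 in
theorem mig_bird_spec_aux (arr : List Int) : mig_bird arr = mig_bird_alt arr := by
  unfold mig_bird mig_bird_alt
  simp only [List.foldl_cons, List.foldl_nil, List.nil_append, List.cons_append]
  rw [sorted_filter_eq_reps]
  have hreps : reps arr = flat [(1, arr.count 1), (2, arr.count 2), (3, arr.count 3),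
      (4, arr.count 4), (5, arr.count 5)] := by
    unfold reps flat
    simp
  rw [hreps, runScan_flat _ 1 0 (by omega)
      (by simp only [List.pairwise_cons, List.mem_cons]; norm_num)]
  rw [selection (fun t => (PySem.List.count arr t : Int))]
  simp only [PySem.List.count_eq, scanB, List.foldl_cons, List.foldl_nil]
  split_ifs <;> omega

-- ===== VERDICT (by name: the statement is the Claim_ definition above) =====
theorem mig_bird_spec : Claim_equal_mig_bird := by
  intro arr _
  unfold Spec_mig_bird
  exact mig_bird_spec_aux arr
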